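-- pv_equiv track=rewrite | github.com/shenuwu/osu-lan-tracking | mod_validator.py | describe_required_mods
-- ===== SOURCE A (Python) =====
-- BASE_REQUIRED = {"SV2", "NF"}
--
-- SLOT_EXTRA = {
--     "NM": set(),
--     "HD": {"HD"},
--     "HR": {"HR"},
--     "DT": {"DT"},
--     "NC": {"DT"},   # NC wordt intern als DT behandeld
--     "FM": None,     # Vrij
--     "TB": None,     # Vrij (tiebreaker)
--     "EX": None,     # Vrij, EZ/HT ook toegestaan
-- }
--
-- def get_slot_category(slot: str) -> str:
--     """Haal de categorie op uit een slot naam. NM1 -> NM, HD2 -> HD, etc."""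
--     return "".join(c for c in slot.upper() if c.isalpha())
--
-- def describe_required_mods(slot: str) -> str:
--     """Geeft een leesbare beschrijving van de vereiste mods voor een slot."""
--     category = get_slot_category(slot)
--     if category == "EX":
--         return "Vrij (alles toegestaan)"
--     if category in ("FM", "TB"):
--         return "SV2 + NF + vrije mods (geen EZ/HT)"
--     extra = SLOT_EXTRA.get(category, set()) or set()
--     required = BASE_REQUIRED | extra
--     # Leesbare namen
--     labels = {"SV2": "ScoreV2", "NF": "NoFail", "HD": "Hidden", "HR": "HardRock", "DT": "DoubleTime"}
--     return " + ".join(labels.get(m, m) for m in sorted(required))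
-- ===== SOURCE B (Python) =====
-- def describe_required_mods(slot: str) -> str:
--     """Geeft een leesbare beschrijving van de vereiste mods voor een slot."""
--     category = "".join(c.upper() for c in slot if c.isalpha())
--     table = {
--         "EX": "Vrij (alles toegestaan)",
--         "FM": "SV2 + NF + vrije mods (geen EZ/HT)",
--         "TB": "SV2 + NF + vrije mods (geen EZ/HT)",
--         "NM": "NoFail + ScoreV2",
--         "HD": "Hidden + NoFail + ScoreV2",
--         "HR": "HardRock + NoFail + ScoreV2",
--         "DT": "DoubleTime + NoFail + ScoreV2",
--         "NC": "DoubleTime + NoFail + ScoreV2",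
--     }
--     return table.get(category, "NoFail + ScoreV2")
-- ===== Notes on version B (the rewrite author's own statement) =====
-- stated objective: simpler
-- what changed: Replaced the per-call set-union/sort/label-map/join pipeline (and its dict of per-slot mod sets) with a single precomputed category-to-description string table looked up once, falling back to the base description for unknown categories.
import Mathlib
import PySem

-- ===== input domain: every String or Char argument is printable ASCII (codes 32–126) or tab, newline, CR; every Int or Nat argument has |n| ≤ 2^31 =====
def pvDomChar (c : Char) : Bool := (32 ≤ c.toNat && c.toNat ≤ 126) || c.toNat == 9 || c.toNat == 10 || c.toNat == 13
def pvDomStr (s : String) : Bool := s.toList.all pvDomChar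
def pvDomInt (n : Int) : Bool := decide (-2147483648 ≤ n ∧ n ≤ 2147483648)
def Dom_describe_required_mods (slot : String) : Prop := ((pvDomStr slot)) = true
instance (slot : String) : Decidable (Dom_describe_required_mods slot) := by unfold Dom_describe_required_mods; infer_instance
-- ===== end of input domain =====

-- B replaces A's per-call set-union/sort/label-map/join pipeline with one precomputed
-- category → description-string table looked up once (simpler; same return values).

-- ===== PORT A =====
-- BASE_REQUIRED = {"SV2", "NF"}
def BASE_REQUIRED : PySem.Set String := PySem.Set.ofList ["SV2", "NF"]

-- SLOT_EXTRA: values are either a set of mods or None ("vrij")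
def SLOT_EXTRA : PySem.Dict String (Option (PySem.Set String)) :=
  PySem.Dict.ofList
    [ ("NM", some PySem.Set.empty)
    , ("HD", some (PySem.Set.ofList ["HD"]))
    , ("HR", some (PySem.Set.ofList ["HR"]))
    , ("DT", some (PySem.Set.ofList ["DT"]))
    , ("NC", some (PySem.Set.ofList ["DT"]))
    , ("FM", none)
    , ("TB", none)
    , ("EX", none) ]

-- "".join(c for c in slot.upper() if c.isalpha())  (a join of single characters = the filtered char list)
def get_slot_category (slot : String) : String :=
  String.ofList ((PySem.Str.upper slot).toList.filter PySem.Chars.isalpha)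

def describe_required_mods (slot : String) : String :=
  let category := get_slot_category slot
  if category = "EX" then "Vrij (alles toegestaan)"
  else if category = "FM" ∨ category = "TB" then "SV2 + NF + vrije mods (geen EZ/HT)"
  else
    -- extra = SLOT_EXTRA.get(category, set()) or set()   (None and the empty set are falsy)
    let extraOpt : Option (PySem.Set String) := (SLOT_EXTRA.get? category).getD (some PySem.Set.empty)
    let extra : PySem.Set String :=
      match extraOpt with
      | none => PySem.Set.empty
      | some s => if s.isEmpty then PySem.Set.empty else s
    let required : PySem.Set String := PySem.Set.union BASE_REQUIRED extra
    let labels : PySem.Dict String String :=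
      PySem.Dict.ofList
        [("SV2", "ScoreV2"), ("NF", "NoFail"), ("HD", "Hidden"), ("HR", "HardRock"), ("DT", "DoubleTime")]
    PySem.Str.join " + "
      ((PySem.List.sorted required (fun x => x) false).map (fun m => labels.getD m m))

-- ===== PORT B =====
def describe_required_mods_alt (slot : String) : String :=
  -- category = "".join(c.upper() for c in slot if c.isalpha())
  let category := String.ofList ((slot.toList.filter PySem.Chars.isalpha).map PySem.Chars.upperChar)
  let table : PySem.Dict String String :=
    PySem.Dict.ofList
      [ ("EX", "Vrij (alles toegestaan)")
      , ("FM", "SV2 + NF + vrije mods (geen EZ/HT)")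
      , ("TB", "SV2 + NF + vrije mods (geen EZ/HT)")
      , ("NM", "NoFail + ScoreV2")
      , ("HD", "Hidden + NoFail + ScoreV2")
      , ("HR", "HardRock + NoFail + ScoreV2")
      , ("DT", "DoubleTime + NoFail + ScoreV2")
      , ("NC", "DoubleTime + NoFail + ScoreV2") ]
  table.getD category "NoFail + ScoreV2"

-- ===== PRECONDITION & SPEC =====
def Spec_describe_required_mods (slot : String) (out : String) : Prop := out = describe_required_mods_alt slot
instance (slot : String) (out : String) : Decidable (Spec_describe_required_mods slot out) := by unfold Spec_describe_required_mods; infer_instance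

-- ===== CLAIM (what is proved, stated in full; the proofs are below) =====
def Claim_equal_describe_required_mods : Prop := ∀ (slot : String), Dom_describe_required_mods slot → Spec_describe_required_mods slot (describe_required_mods slot)

-- ===== LEMMAS AND PROOFS =====

-- A's branch-and-pipeline tail as a function of the category (proof-side helper)
def tailA (category : String) : String :=
  if category = "EX" then "Vrij (alles toegestaan)"
  else if category = "FM" ∨ category = "TB" then "SV2 + NF + vrije mods (geen EZ/HT)"
  else
    let extraOpt : Option (PySem.Set String) := (SLOT_EXTRA.get? category).getD (some PySem.Set.empty)
    let extra : PySem.Set String :=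
      match extraOpt with
      | none => PySem.Set.empty
      | some s => if s.isEmpty then PySem.Set.empty else s
    let required : PySem.Set String := PySem.Set.union BASE_REQUIRED extra
    let labels : PySem.Dict String String :=
      PySem.Dict.ofList
        [("SV2", "ScoreV2"), ("NF", "NoFail"), ("HD", "Hidden"), ("HR", "HardRock"), ("DT", "DoubleTime")]
    PySem.Str.join " + "
      ((PySem.List.sorted required (fun x => x) false).map (fun m => labels.getD m m))

-- B's table lookup as a function of the category (proof-side helper)
def tailB (category : String) : String :=
  (PySem.Dict.ofList
    [ ("EX", "Vrij (alles toegestaan)")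
    , ("FM", "SV2 + NF + vrije mods (geen EZ/HT)")
    , ("TB", "SV2 + NF + vrije mods (geen EZ/HT)")
    , ("NM", "NoFail + ScoreV2")
    , ("HD", "Hidden + NoFail + ScoreV2")
    , ("HR", "HardRock + NoFail + ScoreV2")
    , ("DT", "DoubleTime + NoFail + ScoreV2")
    , ("NC", "DoubleTime + NoFail + ScoreV2") ] : PySem.Dict String String).getD category "NoFail + ScoreV2"

theorem A_eq (slot : String) : describe_required_mods slot = tailA (get_slot_category slot) := rfl

theorem B_eq (slot : String) :
    describe_required_mods_alt slot
      = tailB (String.ofList ((slot.toList.filter PySem.Chars.isalpha).map PySem.Chars.upperChar)) := rfl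

-- upper-casing a character does not change whether it is (ASCII) alphabetic
theorem isalpha_upperChar (c : Char) : PySem.Chars.isalpha (PySem.Chars.upperChar c) = PySem.Chars.isalpha c := by
  simp only [PySem.Chars.isalpha, PySem.Chars.upperChar, PySem.Chars.islower, PySem.Chars.isupper]
  by_cases h1 : 'a' ≤ c <;> by_cases h2 : c ≤ 'z'
  · have h1' : 97 ≤ c.toNat := h1
    have h2' : c.toNat ≤ 122 := h2
    have hv : (Char.ofNat (c.toNat - 32)).toNat = c.toNat - 32 := by
      rw [Char.toNat_ofNat, if_pos]
      unfold Nat.isValidChar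
      omega
    have hA : 'A' ≤ Char.ofNat (c.toNat - 32) := by
      show (65 : Nat) ≤ (Char.ofNat (c.toNat - 32)).toNat
      rw [hv]; omega
    have hZ : Char.ofNat (c.toNat - 32) ≤ 'Z' := by
      show (Char.ofNat (c.toNat - 32)).toNat ≤ 90
      rw [hv]; omega
    simp [h1, h2, hA, hZ]
  · simp [h1, h2]
  · simp [h1, h2]
  · simp [h1, h2]

-- filtering alphabetic characters commutes with upper-casing
theorem filter_upper_comm (cs : List Char) :
    (PySem.Chars.upper cs).filter PySem.Chars.isalpha
      = (cs.filter PySem.Chars.isalpha).map PySem.Chars.upperChar := by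
  simp only [PySem.Chars.upper, List.filter_map]
  congr 1
  apply List.filter_congr
  intro x _
  simp [isalpha_upperChar]

theorem cat_eq (slot : String) :
    get_slot_category slot
      = String.ofList ((slot.toList.filter PySem.Chars.isalpha).map PySem.Chars.upperChar) := by
  simp [get_slot_category, filter_upper_comm]

-- sorted on strings, via the toList order (String `<` is toList `<`)
theorem sortedStr (xs ys : List String) (hp : ys.Perm xs)
    (hw : ys.Pairwise (fun a b => a.toList < b.toList)) :
    PySem.List.sorted xs (fun x => x) false = ys := by
  refine PySem.List.sorted_eq_of_perm_of_pairwise_lt _ _ _ hp ?_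
  exact hw.imp fun h => String.lt_iff_toList_lt.mpr h

-- evaluate A's tail for one non-free category, given its extra set
theorem tailA_eval (cat : String) (ex : List String) (req sorted_req : List String)
    (h1 : ¬ cat = "EX") (h2 : ¬ (cat = "FM" ∨ cat = "TB"))
    (hget : (SLOT_EXTRA.get? cat).getD (some PySem.Set.empty) = some ex)
    (hex : ex ≠ [])
    (hreq : PySem.Set.union BASE_REQUIRED ex = req)
    (hs : PySem.List.sorted req (fun x => x) false = sorted_req)
    (out : String)
    (hout : PySem.Str.join " + "
      ((sorted_req).map (fun m =>
        (PySem.Dict.ofList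
          [("SV2", "ScoreV2"), ("NF", "NoFail"), ("HD", "Hidden"), ("HR", "HardRock"), ("DT", "DoubleTime")]
          : PySem.Dict String String).getD m m)) = out) :
    tailA cat = out := by
  have hne : ex.isEmpty = false := by
    cases ex with
    | nil => exact absurd rfl hex
    | cons a t => rfl
  simp only [tailA, if_neg h1, if_neg h2, hget, Option.getD_some, hne, Bool.false_eq_true,
    if_false, hreq, hs, hout]

-- the same for the base-only ("NM" / unknown-category) case
theorem tailA_base (cat : String)
    (h1 : ¬ cat = "EX") (h2 : ¬ (cat = "FM" ∨ cat = "TB"))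
    (hget : (SLOT_EXTRA.get? cat).getD (some PySem.Set.empty) = some []) :
    tailA cat = "NoFail + ScoreV2" := by
  have hs : PySem.List.sorted (PySem.Set.union BASE_REQUIRED PySem.Set.empty) (fun x => x) false
      = ["NF", "SV2"] := sortedStr _ _ (by decide) (by decide)
  simp only [tailA, if_neg h1, if_neg h2, hget, Option.getD_some, List.isEmpty_nil, if_true, hs]
  decide

-- both tails agree on every category string
theorem tails (cat : String) : tailA cat = tailB cat := by
  by_cases h1 : cat = "EX"
  · subst h1; simp only [tailA, if_pos rfl]; decide
  by_cases h2 : cat = "FM"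
  · subst h2
    simp only [tailA, if_neg (by decide : ¬ ("FM" : String) = "EX"),
      if_pos (Or.inl rfl : ("FM" : String) = "FM" ∨ ("FM" : String) = "TB")]
    decide
  by_cases h3 : cat = "TB"
  · subst h3
    simp only [tailA, if_neg (by decide : ¬ ("TB" : String) = "EX"),
      if_pos (Or.inr rfl : ("TB" : String) = "FM" ∨ ("TB" : String) = "TB")]
    decide
  by_cases h4 : cat = "NM"
  · subst h4
    rw [tailA_base _ (by decide) (by decide) (by decide)]
    decide
  by_cases h5 : cat = "HD"
  · subst h5
    rw [tailA_eval _ ["HD"] ["SV2", "NF", "HD"] ["HD", "NF", "SV2"] (by decide) (by decide)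
      (by decide) (by decide) (by decide) (sortedStr _ _ (by decide) (by decide))
      "Hidden + NoFail + ScoreV2" (by decide)]
    decide
  by_cases h6 : cat = "HR"
  · subst h6
    rw [tailA_eval _ ["HR"] ["SV2", "NF", "HR"] ["HR", "NF", "SV2"] (by decide) (by decide)
      (by decide) (by decide) (by decide) (sortedStr _ _ (by decide) (by decide))
      "HardRock + NoFail + ScoreV2" (by decide)]
    decide
  by_cases h7 : cat = "DT"
  · subst h7
    rw [tailA_eval _ ["DT"] ["SV2", "NF", "DT"] ["DT", "NF", "SV2"] (by decide) (by decide)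
      (by decide) (by decide) (by decide) (sortedStr _ _ (by decide) (by decide))
      "DoubleTime + NoFail + ScoreV2" (by decide)]
    decide
  by_cases h8 : cat = "NC"
  · subst h8
    rw [tailA_eval _ ["DT"] ["SV2", "NF", "DT"] ["DT", "NF", "SV2"] (by decide) (by decide)
      (by decide) (by decide) (by decide) (sortedStr _ _ (by decide) (by decide))
      "DoubleTime + NoFail + ScoreV2" (by decide)]
    decide
  -- unknown category: both sides fall back to the base description
  have e1 : (("EX" : String) == cat) = false := beq_eq_false_iff_ne.mpr (fun e => h1 e.symm)
  have e2 : (("FM" : String) == cat) = false := beq_eq_false_iff_ne.mpr (fun e => h2 e.symm)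
  have e3 : (("TB" : String) == cat) = false := beq_eq_false_iff_ne.mpr (fun e => h3 e.symm)
  have e4 : (("NM" : String) == cat) = false := beq_eq_false_iff_ne.mpr (fun e => h4 e.symm)
  have e5 : (("HD" : String) == cat) = false := beq_eq_false_iff_ne.mpr (fun e => h5 e.symm)
  have e6 : (("HR" : String) == cat) = false := beq_eq_false_iff_ne.mpr (fun e => h6 e.symm)
  have e7 : (("DT" : String) == cat) = false := beq_eq_false_iff_ne.mpr (fun e => h7 e.symm)
  have e8 : (("NC" : String) == cat) = false := beq_eq_false_iff_ne.mpr (fun e => h8 e.symm)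
  have hget : SLOT_EXTRA.get? cat = none := by
    have hSE : SLOT_EXTRA = PySem.Dict.mk
        [ ("NM", some PySem.Set.empty), ("HD", some (PySem.Set.ofList ["HD"]))
        , ("HR", some (PySem.Set.ofList ["HR"])), ("DT", some (PySem.Set.ofList ["DT"]))
        , ("NC", some (PySem.Set.ofList ["DT"])), ("FM", none), ("TB", none), ("EX", none) ] := by
      decide
    rw [hSE]
    simp only [PySem.Dict.get?_mk_cons, e1, e2, e3, e4, e5, e6, e7, e8, Bool.false_eq_true, if_false]
    rfl
  have hB : tailB cat = "NoFail + ScoreV2" := by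
    have hT : (PySem.Dict.ofList
        [ ("EX", "Vrij (alles toegestaan)")
        , ("FM", "SV2 + NF + vrije mods (geen EZ/HT)")
        , ("TB", "SV2 + NF + vrije mods (geen EZ/HT)")
        , ("NM", "NoFail + ScoreV2")
        , ("HD", "Hidden + NoFail + ScoreV2")
        , ("HR", "HardRock + NoFail + ScoreV2")
        , ("DT", "DoubleTime + NoFail + ScoreV2")
        , ("NC", "DoubleTime + NoFail + ScoreV2") ] : PySem.Dict String String) = PySem.Dict.mk
        [ ("EX", "Vrij (alles toegestaan)")
        , ("FM", "SV2 + NF + vrije mods (geen EZ/HT)")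
        , ("TB", "SV2 + NF + vrije mods (geen EZ/HT)")
        , ("NM", "NoFail + ScoreV2")
        , ("HD", "Hidden + NoFail + ScoreV2")
        , ("HR", "HardRock + NoFail + ScoreV2")
        , ("DT", "DoubleTime + NoFail + ScoreV2")
        , ("NC", "DoubleTime + NoFail + ScoreV2") ] := by decide
    simp only [tailB, hT, PySem.Dict.getD, PySem.Dict.get?_mk_cons, e1, e2, e3, e4, e5, e6, e7,
      e8, Bool.false_eq_true, if_false]
    rfl
  rw [hB, tailA_base _ h1 (fun h => (h.elim (fun a => h2 a) (fun a => h3 a)))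
    (by rw [hget]; rfl)]

-- ===== VERDICT (by name: the statement is the Claim_ definition above) =====
theorem describe_required_mods_spec : Claim_equal_describe_required_mods := by
  intro slot _
  unfold Spec_describe_required_mods
  rw [A_eq, B_eq, cat_eq]
  exact tails _
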